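-- pv_equiv track=rewrite | github.com/RitamDey/Everything | Competive Programming/Python/HackerRank/migratory-birds.py | count_birds
-- ===== SOURCE A (Python) =====
-- def count_birds(birds):
--     most_birds = (6, 0)
--
--     for i in [1, 2, 3, 4, 5]:
--         c = birds.count(i)
--         if c > most_birds[-1]:
--             most_birds = (i, c)
--         elif c == most_birds[-1] and i < most_birds[0]:
--             most_birds = (i, c)
--     return most_birds[0]
-- ===== SOURCE B (Python) =====
-- def count_birds(birds):
--     # Sort, then scan runs of equal values: in ascending order the first run
--     # to reach a new maximum length is the lowest id with that count.
--     best, best_run = 1, 0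
--     run, prev = 0, None
--     for b in sorted(birds):
--         if not (1 <= b <= 5):
--             continue
--         if b == prev:
--             run += 1
--         else:
--             prev, run = b, 1
--         if run > best_run:
--             best, best_run = b, run
--     return best
-- ===== Notes on version B (the rewrite author's own statement) =====
-- stated objective: alternative
-- what changed: B sorts the list and does one run-length scan over the sorted values (first run to exceed the current best wins, which in ascending order is the lowest id), instead of A's five birds.count scans with a running-best tuple.
import Mathlib
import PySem

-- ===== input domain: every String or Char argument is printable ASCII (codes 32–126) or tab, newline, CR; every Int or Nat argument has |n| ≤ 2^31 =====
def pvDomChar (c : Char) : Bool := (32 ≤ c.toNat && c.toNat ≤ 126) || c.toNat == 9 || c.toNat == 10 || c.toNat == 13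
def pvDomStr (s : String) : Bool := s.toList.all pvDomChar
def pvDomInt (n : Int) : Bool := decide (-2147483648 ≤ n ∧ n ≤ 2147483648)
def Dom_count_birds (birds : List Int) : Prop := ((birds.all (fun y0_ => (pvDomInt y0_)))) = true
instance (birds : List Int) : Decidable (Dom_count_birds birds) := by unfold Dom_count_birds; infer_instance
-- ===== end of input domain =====

-- B sorts the list and does one run-length scan over the sorted values (first run to beat
-- the current best wins, i.e. lowest id on ties), instead of A's five birds.count scans.

-- ===== PORT A =====
def count_birds (birds : List Int) : Int :=
  (([1, 2, 3, 4, 5] : List Int).foldl (fun (most : Int × Int) i =>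
    let c : Int := (PySem.List.count birds i : Int)
    if c > most.2 then (i, c)
    else if c = most.2 ∧ i < most.1 then (i, c)
    else most) (6, 0)).1

-- ===== PORT B =====
-- state (best, best_run, run, prev); the `continue` is the identity branch of the fold
def pvBStep (st : Int × Int × Int × Option Int) (b : Int) : Int × Int × Int × Option Int :=
  if ¬ (1 ≤ b ∧ b ≤ 5) then st
  else
    let run : Int := if some b = st.2.2.2 then st.2.2.1 + 1 else 1
    if run > st.2.1 then (b, run, run, some b) else (st.1, st.2.1, run, some b)

def count_birds_alt (birds : List Int) : Int :=
  ((PySem.List.sorted birds (fun x => x) false).foldl pvBStep (1, 0, 0, none)).1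

-- ===== PRECONDITION & SPEC =====
def Spec_count_birds (birds : List Int) (out : Int) : Prop := out = count_birds_alt birds
instance (birds : List Int) (out : Int) : Decidable (Spec_count_birds birds out) := by unfold Spec_count_birds; infer_instance

-- ===== CLAIM (what is proved, stated in full; the proofs are below) =====
def Claim_equal_count_birds : Prop := ∀ (birds : List Int), Dom_count_birds birds → Spec_count_birds birds (count_birds birds)

-- ===== LEMMAS AND PROOFS =====

-- Invariant of B's scan over the processed (sorted, in-range) prefix q.
def pvInv (q : List Int) (st : Int × Int × Int × Option Int) : Prop :=
  1 ≤ st.1 ∧ st.1 ≤ 5 ∧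
  st.2.1 = (q.count st.1 : Int) ∧
  (∀ u : Int, 1 ≤ u → u ≤ 5 → (q.count u : Int) ≤ st.2.1) ∧
  (∀ u : Int, 1 ≤ u → u < st.1 → (q.count u : Int) < st.2.1) ∧
  (match st.2.2.2 with
   | none => q = [] ∧ st.2.2.1 = 0
   | some pv => pv ∈ q ∧ (∀ a ∈ q, a ≤ pv) ∧ st.2.2.1 = (q.count pv : Int))

theorem pvInv_step (q : List Int) (st : Int × Int × Int × Option Int) (x : Int)
    (hI : pvInv q st) (hqr : ∀ a ∈ q, 1 ≤ a ∧ a ≤ 5)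
    (hx1 : 1 ≤ x) (hx5 : x ≤ 5) (hub : ∀ a ∈ q, a ≤ x) :
    pvInv (q ++ [x]) (pvBStep st x) := by
  obtain ⟨best, br, run, prev⟩ := st
  obtain ⟨hb1, hb5, hbr, hmax, hstr, hprev⟩ := hI
  simp only at hbr hmax hstr hprev
  unfold pvBStep
  rw [if_neg (not_not_intro ⟨hx1, hx5⟩)]
  cases prev with
  | none =>
    obtain ⟨hq, hrun0⟩ := hprev
    subst hq
    have hbr0 : br = 0 := by simpa using hbr
    rw [if_neg (by simp : ¬ (some x = (none : Option Int)))]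
    rw [if_pos (by simp only []; omega)]
    refine ⟨hx1, hx5, ?_, ?_, ?_, ?_⟩
    · simp
    · intro u h1 h2
      simp only [List.nil_append, List.count_cons, List.count_nil]
      split <;> omega
    · intro u h1 h2
      have hne : ¬ (x = u) := by omega
      simp only [List.nil_append, List.count_cons, List.count_nil, beq_iff_eq]
      rw [if_neg hne]
      omega
    · refine ⟨by simp, by simp, by simp⟩
  | some pv =>
    obtain ⟨hmem, hubq, hrun⟩ := hprev
    obtain ⟨hpv1, hpv5⟩ := hqr pv hmem
    have hcpv : 0 < List.count pv q := List.count_pos_iff.mpr hmem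
    have hbrpv : (List.count pv q : Int) ≤ br := hmax pv hpv1 hpv5
    have hbestmem : best ∈ q := by
      refine List.count_pos_iff.mp ?_
      omega
    have hbestpv : best ≤ pv := hubq best hbestmem
    have hcount_app : ∀ u : Int, List.count u (q ++ [x])
        = List.count u q + (if x = u then 1 else 0) := by
      intro u
      rw [List.count_append, List.count_cons, List.count_nil]
      simp [beq_iff_eq]
    by_cases hxe : x = pv
    · rw [if_pos (by rw [hxe] : some x = some pv)]
      have hcx : (List.count x (q ++ [x]) : Int) = run + 1 := by
        rw [hcount_app x, if_pos rfl, hxe, hrun]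
        push_cast; ring
      by_cases hgt : run + 1 > br
      · rw [if_pos (by simp only []; omega)]
        refine ⟨hx1, hx5, by simp only []; omega, ?_, ?_, ?_⟩
        · intro u h1 h2
          simp only []
          by_cases hux : x = u
          · subst hux; omega
          · rw [hcount_app u, if_neg hux]
            have := hmax u h1 h2
            push_cast
            omega
        · intro u h1 h2
          simp only []
          rw [hcount_app u, if_neg (by omega)]
          have := hmax u h1 (by omega)
          push_cast
          omega
        · exact ⟨by simp, fun a ha => by
            rcases List.mem_append.mp ha with h | h
            · exact le_of_le_of_eq (hubq a h) hxe.symm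
            · simp at h; omega, by simp only []; omega⟩
      · rw [if_neg (by simp only []; omega)]
        have hbnx : best ≠ x := by
          intro h
          rw [h, hxe] at hbr
          omega
        refine ⟨hb1, hb5, ?_, ?_, ?_, ?_⟩
        · simp only []
          rw [hcount_app best, if_neg (fun h => hbnx h.symm), hbr]
          push_cast; ring
        · intro u h1 h2
          simp only []
          by_cases hux : x = u
          · subst hux; omega
          · rw [hcount_app u, if_neg hux]
            have := hmax u h1 h2
            push_cast; omega
        · intro u h1 h2
          simp only [] at h2 ⊢
          have hux : ¬ (x = u) := by omega
          rw [hcount_app u, if_neg hux]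
          have := hstr u h1 h2
          push_cast; omega
        · exact ⟨by simp, fun a ha => by
            rcases List.mem_append.mp ha with h | h
            · exact le_of_le_of_eq (hubq a h) hxe.symm
            · simp at h; omega, hcx.symm⟩
    · rw [if_neg (by simp [hxe] : ¬ (some x = some pv))]
      have hpvx : pv < x := lt_of_le_of_ne (hub pv hmem) (fun h => hxe h.symm)
      have hxnot : x ∉ q := fun h => absurd (hubq x h) (by omega)
      have hcx0 : List.count x q = 0 := List.count_eq_zero.mpr hxnot
      rw [if_neg (by simp only []; omega)]
      have hbx : best < x := by omega
      refine ⟨hb1, hb5, ?_, ?_, ?_, ?_⟩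
      · simp only []
        rw [hcount_app best, if_neg (by omega)]
        omega
      · intro u h1 h2
        simp only []
        by_cases hux : x = u
        · subst hux
          rw [hcount_app x, if_pos rfl, hcx0]
          push_cast; omega
        · rw [hcount_app u, if_neg hux]
          have := hmax u h1 h2
          push_cast; omega
      · intro u h1 h2
        simp only [] at h2 ⊢
        rw [hcount_app u, if_neg (by omega)]
        have := hstr u h1 h2
        push_cast; omega
      · refine ⟨by simp, fun a ha => ?_, ?_⟩
        · rcases List.mem_append.mp ha with h | h
          · exact le_of_lt (lt_of_le_of_lt (hubq a h) hpvx)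
          · simp at h; omega
        · simp only []
          rw [hcount_app x, if_pos rfl, hcx0]
          norm_num

theorem pvBStep_skip (l : List Int) (st : Int × Int × Int × Option Int) :
    l.foldl pvBStep st = (l.filter (fun b => decide (1 ≤ b ∧ b ≤ 5))).foldl pvBStep st := by
  induction l generalizing st with
  | nil => rfl
  | cons b l ih =>
    by_cases h : 1 ≤ b ∧ b ≤ 5
    · simp [h, ih]
    · have : pvBStep st b = st := by simp [pvBStep, h]
      simp [h, this, ih]

theorem pvInv_fold (q : List Int) (hs : q.Pairwise (· ≤ ·))
    (hr : ∀ b ∈ q, 1 ≤ b ∧ b ≤ 5) :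
    pvInv q (q.foldl pvBStep (1, 0, 0, none)) := by
  induction q using List.reverseRecOn with
  | nil =>
    simp only [List.foldl_nil]
    exact ⟨by norm_num, by norm_num, by simp, fun u h1 h2 => by simp,
      fun u h1 h2 => by omega, ⟨rfl, rfl⟩⟩
  | append_singleton q x ih =>
    rw [List.pairwise_append] at hs
    rw [List.foldl_append, List.foldl_cons, List.foldl_nil]
    have hx := hr x (by simp)
    exact pvInv_step q _ x
      (ih hs.1 (fun b hb => hr b (List.mem_append_left _ hb)))
      (fun b hb => hr b (List.mem_append_left _ hb))
      hx.1 hx.2 (fun a ha => hs.2.2 a ha x (by simp))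

-- The strict-improvement selection fold keeps the first (least) maximiser.
theorem pv_sel (f : Int → Int) (l : List Int) (b : Int)
    (hp : l.Pairwise (· < ·)) (hlt : ∀ i ∈ l, b < i) :
    (l.foldl (fun m x => if f m < f x then x else m) b ∈ b :: l) ∧
    (∀ y ∈ b :: l, f y ≤ f (l.foldl (fun m x => if f m < f x then x else m) b)) ∧
    (∀ y ∈ b :: l, y < l.foldl (fun m x => if f m < f x then x else m) b →
      f y < f (l.foldl (fun m x => if f m < f x then x else m) b)) := by
  induction l generalizing b with
  | nil =>
    simp only [List.foldl_nil]
    refine ⟨List.mem_cons_self, ?_, ?_⟩ <;> intro y hy <;>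
      simp only [List.mem_cons, List.not_mem_nil, or_false] at hy <;> subst hy
    · exact le_refl _
    · intro h'
      exact absurd h' (lt_irrefl _)
  | cons x l ih =>
    simp only [List.foldl_cons]
    have hxl := (List.pairwise_cons.mp hp).1
    have hp' := (List.pairwise_cons.mp hp).2
    have hbx : b < x := hlt x List.mem_cons_self
    by_cases h : f b < f x
    · rw [if_pos h]
      obtain ⟨m1, m2, m3⟩ := ih x hp' hxl
      refine ⟨?_, ?_, ?_⟩
      · rcases List.mem_cons.mp m1 with h' | h'
        · rw [h']
          exact List.mem_cons_of_mem _ List.mem_cons_self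
        · exact List.mem_cons_of_mem _ (List.mem_cons_of_mem _ h')
      · intro y hy
        rcases List.mem_cons.mp hy with h' | h'
        · subst h'
          exact le_of_lt (lt_of_lt_of_le h (m2 x List.mem_cons_self))
        · exact m2 y h'
      · intro y hy hyM
        rcases List.mem_cons.mp hy with h' | h'
        · subst h'
          exact lt_of_lt_of_le h (m2 x List.mem_cons_self)
        · exact m3 y h' hyM
    · rw [if_neg h]
      obtain ⟨m1, m2, m3⟩ := ih b hp' (fun i hi => lt_trans hbx (hxl i hi))
      refine ⟨?_, ?_, ?_⟩
      · rcases List.mem_cons.mp m1 with h' | h'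
        · rw [h']
          exact List.mem_cons_self
        · exact List.mem_cons_of_mem _ (List.mem_cons_of_mem _ h')
      · intro y hy
        rcases List.mem_cons.mp hy with h' | h'
        · rw [h']
          exact m2 b List.mem_cons_self
        · rcases List.mem_cons.mp h' with h'' | h''
          · subst h''
            exact le_trans (le_of_not_gt h) (m2 b List.mem_cons_self)
          · exact m2 y (List.mem_cons_of_mem _ h'')
      · intro y hy hyM
        rcases List.mem_cons.mp hy with h' | h'
        · rw [h'] at hyM
          rw [h']
          exact m3 b List.mem_cons_self hyM
        · rcases List.mem_cons.mp h' with h'' | h''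
          · subst h''
            have hbM : f b < f (l.foldl (fun m x => if f m < f x then x else m) b) :=
              m3 b List.mem_cons_self (lt_trans hbx hyM)
            exact lt_of_le_of_lt (le_of_not_gt h) hbM
          · exact m3 y (List.mem_cons_of_mem _ h'') hyM

-- The least argmax characterises A's selection fold over [2,3,4,5] started at 1.
theorem pvChar (f : Int → Int) (v : Int) (hv1 : 1 ≤ v) (hv5 : v ≤ 5)
    (hmax : ∀ u : Int, 1 ≤ u → u ≤ 5 → f u ≤ f v)
    (hstr : ∀ u : Int, 1 ≤ u → u < v → f u < f v) :
    (([2, 3, 4, 5] : List Int).foldl (fun m x => if f m < f x then x else m) 1) = v := by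
  obtain ⟨m1, m2, m3⟩ := pv_sel f [2, 3, 4, 5] 1 (by decide) (by decide)
  set M := ([2, 3, 4, 5] : List Int).foldl (fun m x => if f m < f x then x else m) 1 with hM
  have hMr : 1 ≤ M ∧ M ≤ 5 := by
    simp only [List.mem_cons, List.not_mem_nil, or_false] at m1
    rcases m1 with h | h | h | h | h <;> rw [h] <;> norm_num
  have hvmem : v ∈ ((1 : Int) :: [2, 3, 4, 5]) := by
    simp only [List.mem_cons, List.not_mem_nil, or_false]
    omega
  rcases lt_trichotomy M v with h | h | h
  · have h1 := hstr M hMr.1 h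
    have h2 := m2 v hvmem
    linarith
  · exact h
  · have h1 := m3 v hvmem h
    have h2 := hmax M hMr.1 hMr.2
    linarith

-- A's running-best fold over a strictly increasing list, started at its lower bound,
-- never fires its tie branch, so it is the strict-improvement fold.
theorem pv_fold_eq (f : Int → Int) (l : List Int) (b : Int)
    (hlt : ∀ i ∈ l, b < i) (hp : l.Pairwise (· < ·)) :
    (l.foldl (fun (most : Int × Int) i =>
        if f i > most.2 then (i, f i)
        else if f i = most.2 ∧ i < most.1 then (i, f i)
        else most) (b, f b)).1
    = l.foldl (fun m x => if f m < f x then x else m) b := by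
  induction l generalizing b with
  | nil => rfl
  | cons x l ih =>
    rw [List.foldl_cons, List.foldl_cons]
    have hbx : b < x := hlt x (List.mem_cons_self)
    by_cases h : f x > f b
    · simp only [gt_iff_lt] at h ⊢
      rw [if_pos h, if_pos h]
      exact ih x (fun i hi => (List.pairwise_cons.mp hp).1 i hi) (List.pairwise_cons.mp hp).2
    · have h2 : ¬ (f x = f b ∧ x < b) := by rintro ⟨_, hc⟩; omega
      simp only [gt_iff_lt] at h ⊢
      rw [if_neg h, if_neg h2, if_neg h]
      exact ih b (fun i hi => hlt i (List.mem_cons_of_mem _ hi)) (List.pairwise_cons.mp hp).2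

-- A equals the strict-improvement selection fold, for any nonnegative key.
theorem pvA_eq (f : Int → Int) (h0 : 0 ≤ f 1) :
    (([1, 2, 3, 4, 5] : List Int).foldl (fun (most : Int × Int) i =>
        if f i > most.2 then (i, f i)
        else if f i = most.2 ∧ i < most.1 then (i, f i)
        else most) (6, 0)).1
    = ([2, 3, 4, 5] : List Int).foldl (fun m x => if f m < f x then x else m) 1 := by
  have hA : (([1, 2, 3, 4, 5] : List Int).foldl (fun (most : Int × Int) i =>
        if f i > most.2 then (i, f i)
        else if f i = most.2 ∧ i < most.1 then (i, f i)
        else most) (6, 0))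
      = (([2, 3, 4, 5] : List Int).foldl (fun (most : Int × Int) i =>
        if f i > most.2 then (i, f i)
        else if f i = most.2 ∧ i < most.1 then (i, f i)
        else most) (1, f 1)) := by
    rw [List.foldl_cons]
    rcases eq_or_lt_of_le h0 with h | h
    · simp [← h]
    · simp [h]
  rw [hA, pv_fold_eq f [2,3,4,5] 1 (by decide) (by decide)]

-- ===== VERDICT (by name: the statement is the Claim_ definition above) =====
theorem count_birds_spec : Claim_equal_count_birds := by
  intro birds _
  unfold Spec_count_birds count_birds count_birds_alt
  rw [pvBStep_skip]
  set q := (PySem.List.sorted birds (fun x => x) false).filter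
    (fun b => decide (1 ≤ b ∧ b ≤ 5)) with hqdef
  have hq_pairwise : q.Pairwise (· ≤ ·) := by
    exact (PySem.List.sorted_pairwise birds (fun x => x)).filter _
  have hqr : ∀ b ∈ q, 1 ≤ b ∧ b ≤ 5 := by
    intro b hb
    have := List.of_mem_filter hb
    simpa using this
  have hcount : ∀ u : Int, 1 ≤ u → u ≤ 5 → List.count u q = List.count u birds := by
    intro u h1 h2
    rw [hqdef, List.count_filter (by simp; omega)]
    exact (PySem.List.sorted_perm birds (fun x => x) false).count_eq u
  obtain ⟨hb1, hb5, hbr, hmax, hstr, -⟩ := pvInv_fold q hq_pairwise hqr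
  set st := q.foldl pvBStep (1, 0, 0, none) with hst
  set f : Int → Int := fun i => (PySem.List.count birds i : Int) with hf
  have hfc : ∀ u : Int, 1 ≤ u → u ≤ 5 → f u = (List.count u q : Int) := by
    intro u h1 h2
    rw [hf]
    simp only [PySem.List.count_eq, hcount u h1 h2]
  rw [pvA_eq f (by rw [hf]; positivity)]
  refine pvChar f st.1 hb1 hb5 ?_ ?_
  · intro u h1 h2
    rw [hfc u h1 h2, hfc st.1 hb1 hb5]
    have := hmax u h1 h2
    omega
  · intro u h1 h2
    rw [hfc u h1 (by omega), hfc st.1 hb1 hb5]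
    have := hstr u h1 h2
    omega
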